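-- pv_equiv track=rewrite | github.com/zitkat/ukoly_py_zs2018 | 07_seznamy/seznamy_cv.py | vytvor_seznamy
-- ===== SOURCE A (Python) =====
-- def vytvor_seznamy(seznam1, seznam2):
--     sAs = []
--     sNs = []
--     s1ms2 = []
--     s2ms1 = []
--
--     for prvek in seznam1 + seznam2:
--         if prvek in seznam1 and prvek in seznam2:
--             sAs.append(prvek)
--         if prvek not in sNs:
--             sNs.append(prvek)
--
--         if prvek not in seznam2:
--             s1ms2.append(prvek)
--         if prvek not in seznam1:
--             s2ms1.append(prvek)
--     return sAs, sNs, s1ms2, s2ms1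
-- ===== SOURCE B (Python) =====
-- def vytvor_seznamy(seznam1, seznam2):
--     # Partition each source list once against the other's hash set (no scan over
--     # the concatenation, one membership test per element); union built by two
--     # staged dedup passes sharing one seen set.
--     set1, set2 = set(seznam1), set(seznam2)
--     both1, only1 = _partition(seznam1, set2)
--     both2, only2 = _partition(seznam2, set1)
--     seen = set()
--     sNs = []
--     _dedup_into(seznam1, seen, sNs)
--     _dedup_into(seznam2, seen, sNs)
--     return both1 + both2, sNs, only1, only2
--
--
-- def _partition(lst, other):
--     inside, outside = [], []
--     for x in lst:
--         (inside if x in other else outside).append(x)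
--     return inside, outside
--
--
-- def _dedup_into(lst, seen, out):
--     for x in lst:
--         if x not in seen:
--             seen.add(x)
--             out.append(x)
-- ===== Notes on version B (the rewrite author's own statement) =====
-- stated objective: faster
-- what changed: Instead of one merged loop over seznam1+seznam2 doing four list-membership scans per element, B partitions each source list once against a hash set of the other (intersection half + difference in a single test per element) and builds the union by two staged dedup passes over the separate lists sharing one seen set.
import Mathlib
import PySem

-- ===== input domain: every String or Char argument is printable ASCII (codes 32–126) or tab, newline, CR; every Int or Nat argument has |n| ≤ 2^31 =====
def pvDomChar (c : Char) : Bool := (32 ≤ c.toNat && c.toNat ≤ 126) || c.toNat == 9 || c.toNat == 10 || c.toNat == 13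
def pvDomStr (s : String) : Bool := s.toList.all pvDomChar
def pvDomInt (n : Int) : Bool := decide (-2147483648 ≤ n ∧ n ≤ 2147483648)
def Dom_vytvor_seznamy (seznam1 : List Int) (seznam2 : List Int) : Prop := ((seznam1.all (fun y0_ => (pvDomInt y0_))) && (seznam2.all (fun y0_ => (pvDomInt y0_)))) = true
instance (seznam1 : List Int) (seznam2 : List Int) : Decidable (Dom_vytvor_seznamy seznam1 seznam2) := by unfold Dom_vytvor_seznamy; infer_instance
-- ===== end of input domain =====

-- B replaces A's single merged O((n+m)^2) loop by partitioning each source list once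
-- against a hash set of the other and two staged dedup passes sharing a seen set; same values.
-- Python A returns a 4-tuple; both ports render it as a 4-element list of lists (same convention for A and B).

-- ===== PORT A =====
-- one step of A's loop body, acting on the four accumulators
def vsStep (seznam1 seznam2 : List Int) (st : List Int × List Int × List Int × List Int) (prvek : Int) :
    List Int × List Int × List Int × List Int :=
  let sAs := if prvek ∈ seznam1 ∧ prvek ∈ seznam2 then st.1 ++ [prvek] else st.1
  let sNs := if prvek ∉ st.2.1 then st.2.1 ++ [prvek] else st.2.1
  let s1ms2 := if prvek ∉ seznam2 then st.2.2.1 ++ [prvek] else st.2.2.1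
  let s2ms1 := if prvek ∉ seznam1 then st.2.2.2 ++ [prvek] else st.2.2.2
  (sAs, sNs, s1ms2, s2ms1)

def vytvor_seznamy (seznam1 : List Int) (seznam2 : List Int) : List (List Int) :=
  let r := (seznam1 ++ seznam2).foldl (vsStep seznam1 seznam2) ([], [], [], [])
  [r.1, r.2.1, r.2.2.1, r.2.2.2]

-- ===== PORT B =====
-- _partition: classify each element of lst by hash-set membership in other
def vsPartition (other : PySem.Set Int) : List Int → List Int × List Int
  | [] => ([], [])
  | x :: xs =>
    let r := vsPartition other xs
    if PySem.Set.contains other x then (x :: r.1, r.2) else (r.1, x :: r.2)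

-- _dedup_into: one pass over lst, threading (seen set, out list)
def vsDedupInto : List Int → PySem.Set Int × List Int → PySem.Set Int × List Int
  | [], st => st
  | x :: xs, st =>
    vsDedupInto xs (if PySem.Set.contains st.1 x then st else (PySem.Set.add st.1 x, st.2 ++ [x]))

def vytvor_seznamy_alt (seznam1 : List Int) (seznam2 : List Int) : List (List Int) :=
  let p1 := vsPartition (PySem.Set.ofList seznam2) seznam1
  let p2 := vsPartition (PySem.Set.ofList seznam1) seznam2
  let d := vsDedupInto seznam2 (vsDedupInto seznam1 (PySem.Set.empty, []))
  [p1.1 ++ p2.1, d.2, p1.2, p2.2]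

-- ===== PRECONDITION & SPEC =====
def Spec_vytvor_seznamy (seznam1 : List Int) (seznam2 : List Int) (out : List (List Int)) : Prop := out = vytvor_seznamy_alt seznam1 seznam2
instance (seznam1 : List Int) (seznam2 : List Int) (out : List (List Int)) : Decidable (Spec_vytvor_seznamy seznam1 seznam2 out) := by unfold Spec_vytvor_seznamy; infer_instance

-- ===== CLAIM =====
def Claim_equal_vytvor_seznamy : Prop := ∀ (seznam1 : List Int) (seznam2 : List Int), Dom_vytvor_seznamy seznam1 seznam2 → Spec_vytvor_seznamy seznam1 seznam2 (vytvor_seznamy seznam1 seznam2)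

-- ===== LEMMAS AND PROOFS =====

-- A's list-membership dedup in closed form (proof-only helper)
def vsDedupA (seen : List Int) : List Int → List Int
  | [] => []
  | x :: xs => if x ∈ seen then vsDedupA seen xs else x :: vsDedupA (seen ++ [x]) xs

-- A's foldl, from arbitrary accumulators, in closed form
theorem vsFold_eq (seznam1 seznam2 : List Int) :
    ∀ (l a n c d : List Int),
      l.foldl (vsStep seznam1 seznam2) (a, n, c, d) =
        (a ++ l.filter (fun p => decide (p ∈ seznam1) && decide (p ∈ seznam2)),
         n ++ vsDedupA n l,
         c ++ l.filter (fun p => !decide (p ∈ seznam2)),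
         d ++ l.filter (fun p => !decide (p ∈ seznam1))) := by
  intro l
  induction l with
  | nil => intro a n c d; simp [vsDedupA]
  | cons x xs ih =>
    intro a n c d
    simp only [List.foldl_cons, vsStep]
    by_cases hx : x ∈ n
    · rw [if_neg (show ¬ (x ∉ n) from fun h => h hx)]
      simp only [vsDedupA, if_pos hx]
      rw [ih]
      by_cases h1 : x ∈ seznam1 <;> by_cases h2 : x ∈ seznam2 <;>
        simp [h1, h2, List.append_assoc]
    · simp only [vsDedupA, if_neg hx, if_pos hx]
      rw [ih]
      by_cases h1 : x ∈ seznam1 <;> by_cases h2 : x ∈ seznam2 <;>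
        simp [h1, h2, List.append_assoc]

theorem contains_ofList_eq (other : List Int) (x : Int) :
    PySem.Set.contains (PySem.Set.ofList other) x = decide (x ∈ other) := by
  by_cases h : x ∈ other <;>
    simp [Bool.eq_iff_iff, PySem.Set.contains_iff, PySem.Set.mem_ofList, h]

-- B's partition against set(other) is the two filters by membership in other
theorem vsPartition_eq (other l : List Int) :
    vsPartition (PySem.Set.ofList other) l =
      (l.filter (fun x => decide (x ∈ other)), l.filter (fun x => !decide (x ∈ other))) := by
  induction l with
  | nil => simp [vsPartition]
  | cons x xs ih =>
    simp only [vsPartition, contains_ofList_eq, ih]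
    by_cases h : x ∈ other <;> simp [h]

-- B's seen-set dedup equals A's list-membership dedup when seen and out agree as sets
theorem vsDedupInto_eq :
    ∀ (l : List Int) (seen : PySem.Set Int) (out : List Int),
      (∀ x, x ∈ seen ↔ x ∈ out) →
      (vsDedupInto l (seen, out)).2 = out ++ vsDedupA out l ∧
      (∀ x, x ∈ (vsDedupInto l (seen, out)).1 ↔ x ∈ (vsDedupInto l (seen, out)).2) := by
  intro l
  induction l with
  | nil => intro seen out h; exact ⟨by simp [vsDedupInto, vsDedupA], by simpa [vsDedupInto] using h⟩
  | cons x xs ih =>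
    intro seen out h
    by_cases hx : x ∈ out
    · have hcs : PySem.Set.contains seen x = true := (PySem.Set.contains_iff seen x).mpr ((h x).mpr hx)
      have hstep : vsDedupInto (x :: xs) (seen, out) = vsDedupInto xs (seen, out) := by
        simp only [vsDedupInto]
        simp only [hcs, if_true]
      rw [hstep]
      have hih := ih seen out h
      exact ⟨by rw [hih.1]; simp [vsDedupA, hx], hih.2⟩
    · have hcs : PySem.Set.contains seen x = false := by
        cases hcc : PySem.Set.contains seen x
        · rfl
        · exact absurd ((h x).mp ((PySem.Set.contains_iff seen x).mp hcc)) hx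
      have hstep : vsDedupInto (x :: xs) (seen, out) = vsDedupInto xs (PySem.Set.add seen x, out ++ [x]) := by
        simp only [vsDedupInto]
        simp only [hcs, Bool.false_eq_true, if_false]
      rw [hstep]
      have hinv : ∀ y, y ∈ PySem.Set.add seen x ↔ y ∈ out ++ [x] := by
        intro y; simp [PySem.Set.mem_add, h y]
      have hih := ih (PySem.Set.add seen x) (out ++ [x]) hinv
      refine ⟨?_, hih.2⟩
      rw [hih.1]
      simp [vsDedupA, hx, List.append_assoc]

-- A's dedup distributes over append
theorem vsDedupA_append (l1 : List Int) :
    ∀ (l2 seen : List Int), vsDedupA seen (l1 ++ l2) = vsDedupA seen l1 ++ vsDedupA (seen ++ vsDedupA seen l1) l2 := by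
  induction l1 with
  | nil => intro l2 seen; simp [vsDedupA]
  | cons x xs ih =>
    intro l2 seen
    by_cases hx : x ∈ seen
    · simp [vsDedupA, hx, ih]
    · simp [vsDedupA, hx, ih, List.append_assoc]

theorem filter_and_left (s1 s2 : List Int) :
    s1.filter (fun p => decide (p ∈ s1) && decide (p ∈ s2)) = s1.filter (fun x => decide (x ∈ s2)) := by
  apply List.filter_congr; intro x hx; simp [hx]

theorem filter_and_right (s1 s2 : List Int) :
    s2.filter (fun p => decide (p ∈ s1) && decide (p ∈ s2)) = s2.filter (fun x => decide (x ∈ s1)) := by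
  apply List.filter_congr; intro x hx; simp [hx]

theorem filter_notmem_self (s : List Int) :
    s.filter (fun p => !decide (p ∈ s)) = [] := by
  rw [List.filter_eq_nil_iff]; intro x hx; simp [hx]

-- ===== VERDICT =====
theorem vytvor_seznamy_spec : Claim_equal_vytvor_seznamy := by
  intro s1 s2 _
  show _ = _
  unfold vytvor_seznamy vytvor_seznamy_alt
  rw [vsFold_eq, vsPartition_eq, vsPartition_eq]
  have hd1 := vsDedupInto_eq s1 PySem.Set.empty [] (by simp [PySem.Set.empty])
  obtain ⟨sn1, out1, heq⟩ : ∃ a b, vsDedupInto s1 (PySem.Set.empty, []) = (a, b) := ⟨_, _, rfl⟩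
  rw [heq] at hd1
  simp only at hd1
  have hd2 := vsDedupInto_eq s2 sn1 out1 hd1.2
  simp only [heq]
  rw [hd2.1, hd1.1]
  simp only [List.nil_append, List.filter_append]
  rw [filter_and_left, filter_and_right, filter_notmem_self s2, filter_notmem_self s1,
    vsDedupA_append]
  simp
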